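-- pv_equiv track=rewrite | github.com/ozlabsai/gatling | gatling/source/dataset/loaders.py | _infer_sensitivity
-- ===== SOURCE A (Python) =====
-- def _infer_sensitivity(text: str, tool_name: str) -> int:
--     """Infer sensitivity level (1-5) from text and tool."""
--     text_lower = text.lower()
--
--     # High sensitivity keywords
--     if any(word in text_lower for word in ["password", "secret", "private", "admin", "root"]):
--         return 5
--     elif any(word in text_lower for word in ["confidential", "internal", "sensitive"]) or any(word in tool_name.lower() for word in ["delete", "drop", "remove"]):
--         return 4
--     elif any(word in text_lower for word in ["user", "account", "data"]):
--         return 3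
--     else:
--         return 2
-- ===== SOURCE B (Python) =====
-- # Data-driven re-implementation: one flat rule table (keyword, level) scanned
-- # once with a running max, default 2. Correct because tier priority in A
-- # coincides with numeric level, so the highest matching rule wins either way.
-- _TEXT_RULES = [
--     ("password", 5), ("secret", 5), ("private", 5), ("admin", 5), ("root", 5),
--     ("confidential", 4), ("internal", 4), ("sensitive", 4),
--     ("user", 3), ("account", 3), ("data", 3),
-- ]
-- _TOOL_RULES = [("delete", 4), ("drop", 4), ("remove", 4)]
--
--
-- def _infer_sensitivity(text: str, tool_name: str) -> int:
--     """Infer sensitivity level (1-5) from text and tool."""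
--     text_lower = text.lower()
--     tool_lower = tool_name.lower()
--     level = 2
--     for word, lvl in _TEXT_RULES:
--         if word in text_lower:
--             level = max(level, lvl)
--     for word, lvl in _TOOL_RULES:
--         if word in tool_lower:
--             level = max(level, lvl)
--     return level
-- ===== Notes on version B (the rewrite author's own statement) =====
-- stated objective: alternative
-- what changed: Replaces the priority-ordered if/elif cascade of any() tier checks with a data-driven flat rule table of (keyword, level) pairs scanned in a single loop keeping a running max (default 2); correct because tier priority equals numeric level.
import Mathlib
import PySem

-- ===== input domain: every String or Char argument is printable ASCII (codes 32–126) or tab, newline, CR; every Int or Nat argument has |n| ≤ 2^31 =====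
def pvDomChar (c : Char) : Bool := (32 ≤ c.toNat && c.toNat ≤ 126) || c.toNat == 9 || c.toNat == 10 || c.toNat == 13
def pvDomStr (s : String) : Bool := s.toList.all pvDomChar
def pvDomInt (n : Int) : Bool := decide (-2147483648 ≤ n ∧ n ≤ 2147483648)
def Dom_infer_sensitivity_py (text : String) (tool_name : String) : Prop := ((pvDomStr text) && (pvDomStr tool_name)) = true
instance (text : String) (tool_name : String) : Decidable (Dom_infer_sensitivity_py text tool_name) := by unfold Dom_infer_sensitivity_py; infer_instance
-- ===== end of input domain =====

-- B replaces A's priority-ordered if/elif cascade of any() checks with a flat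
-- (keyword, level) rule table scanned once with a running max (default 2).


-- ===== PORT A =====
def infer_sensitivity_py (text : String) (tool_name : String) : Int :=
  let text_lower := PySem.Str.lower text
  if (["password", "secret", "private", "admin", "root"].any
        (fun w => PySem.Str.isIn w text_lower)) then 5
  else if ((["confidential", "internal", "sensitive"].any
        (fun w => PySem.Str.isIn w text_lower))
      || (["delete", "drop", "remove"].any
        (fun w => PySem.Str.isIn w (PySem.Str.lower tool_name)))) then 4
  else if (["user", "account", "data"].any
        (fun w => PySem.Str.isIn w text_lower)) then 3
  else 2

-- ===== PORT B =====
def pvTextRules : List (String × Int) :=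
  [("password", 5), ("secret", 5), ("private", 5), ("admin", 5), ("root", 5),
   ("confidential", 4), ("internal", 4), ("sensitive", 4),
   ("user", 3), ("account", 3), ("data", 3)]

def pvToolRules : List (String × Int) := [("delete", 4), ("drop", 4), ("remove", 4)]

def infer_sensitivity_py_alt (text : String) (tool_name : String) : Int :=
  let text_lower := PySem.Str.lower text
  let tool_lower := PySem.Str.lower tool_name
  let level := pvTextRules.foldl
    (fun level r => if PySem.Str.isIn r.1 text_lower then max level r.2 else level) 2
  pvToolRules.foldl
    (fun level r => if PySem.Str.isIn r.1 tool_lower then max level r.2 else level) level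

-- ===== PRECONDITION & SPEC =====
def Spec_infer_sensitivity_py (text : String) (tool_name : String) (out : Int) : Prop := out = infer_sensitivity_py_alt text tool_name
instance (text : String) (tool_name : String) (out : Int) : Decidable (Spec_infer_sensitivity_py text tool_name out) := by unfold Spec_infer_sensitivity_py; infer_instance

-- ===== CLAIM (what is proved, stated in full; the proofs are below) =====
def Claim_equal_infer_sensitivity_py : Prop := ∀ (text : String) (tool_name : String), Dom_infer_sensitivity_py text tool_name → Spec_infer_sensitivity_py text tool_name (infer_sensitivity_py text tool_name)

-- ===== LEMMAS AND PROOFS =====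
-- Fold of one uniform-level tier of the rule table = conditional max with that level.
theorem tier_foldl (s : String) (v : Int) (ws : List String) (a : Int) :
    (ws.map (fun w => (w, v))).foldl
        (fun level r => if PySem.Str.isIn r.1 s then max level r.2 else level) a
      = if ws.any (fun w => PySem.Str.isIn w s) then max a v else a := by
  induction ws generalizing a with
  | nil => simp
  | cons w ws ih =>
    simp only [List.map_cons, List.foldl_cons, List.any_cons, Bool.or_eq_true, ih]
    by_cases hw : PySem.Str.isIn w s = true <;>
      by_cases hany : (ws.any fun w => PySem.Str.isIn w s) = true <;>
        simp only [hw, hany] <;> split_ifs <;> first | rfl | omega | tauto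

theorem infer_sensitivity_eq (text : String) (tool_name : String) :
    infer_sensitivity_py text tool_name = infer_sensitivity_py_alt text tool_name := by
  unfold infer_sensitivity_py infer_sensitivity_py_alt
  have hsplit : pvTextRules
      = (["password", "secret", "private", "admin", "root"].map (fun w => (w, (5:Int))))
        ++ (["confidential", "internal", "sensitive"].map (fun w => (w, (4:Int))))
        ++ (["user", "account", "data"].map (fun w => (w, (3:Int)))) := rfl
  have htool : pvToolRules
      = (["delete", "drop", "remove"].map (fun w => (w, (4:Int)))) := rfl
  rw [hsplit, htool]
  simp only [List.foldl_append, tier_foldl]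
  generalize (["password", "secret", "private", "admin", "root"].any
      (fun w => PySem.Str.isIn w (PySem.Str.lower text))) = b1
  generalize (["confidential", "internal", "sensitive"].any
      (fun w => PySem.Str.isIn w (PySem.Str.lower text))) = b2
  generalize (["user", "account", "data"].any
      (fun w => PySem.Str.isIn w (PySem.Str.lower text))) = b3
  generalize (["delete", "drop", "remove"].any
      (fun w => PySem.Str.isIn w (PySem.Str.lower tool_name))) = b4
  cases b1 <;> cases b2 <;> cases b3 <;> cases b4 <;> rfl
-- ===== VERDICT (by name: the statement is the Claim_ definition above) =====
theorem infer_sensitivity_py_spec : Claim_equal_infer_sensitivity_py := by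
  intro text tool_name _
  exact infer_sensitivity_eq text tool_name
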